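-- pv_equiv track=rewrite | github.com/Thonygon/lesson-manager-app | app.py | pack_languages
-- ===== SOURCE A (Python) =====
-- from typing import List, Tuple, Optional, Dict
--
-- LANG_EN = "English"
--
-- LANG_ES = "Spanish"
--
-- LANG_BOTH = "English,Spanish"
--
-- def pack_languages(selected: List[str]) -> str:
--     s = [x for x in selected if x in (LANG_EN, LANG_ES)]
--     s = sorted(set(s), key=lambda z: 0 if z == LANG_EN else 1)
--     if len(s) == 2:
--         return LANG_BOTH
--     if len(s) == 1:
--         return s[0]
--     return LANG_ES
-- ===== SOURCE B (Python) =====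
-- def pack_languages(selected):
--     en = LANG_EN in selected
--     es = LANG_ES in selected
--     if en and es:
--         return LANG_BOTH
--     if en:
--         return LANG_EN
--     return LANG_ES
--
-- LANG_EN = "English"
-- LANG_ES = "Spanish"
-- LANG_BOTH = "English,Spanish"
-- ===== Notes on version B (the rewrite author's own statement) =====
-- stated objective: simpler
-- what changed: Replaces the filter/set/sort/length-inspection pipeline with two direct membership tests and a three-way branch (EN&ES -> both, EN -> English, otherwise Spanish).
import Mathlib
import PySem

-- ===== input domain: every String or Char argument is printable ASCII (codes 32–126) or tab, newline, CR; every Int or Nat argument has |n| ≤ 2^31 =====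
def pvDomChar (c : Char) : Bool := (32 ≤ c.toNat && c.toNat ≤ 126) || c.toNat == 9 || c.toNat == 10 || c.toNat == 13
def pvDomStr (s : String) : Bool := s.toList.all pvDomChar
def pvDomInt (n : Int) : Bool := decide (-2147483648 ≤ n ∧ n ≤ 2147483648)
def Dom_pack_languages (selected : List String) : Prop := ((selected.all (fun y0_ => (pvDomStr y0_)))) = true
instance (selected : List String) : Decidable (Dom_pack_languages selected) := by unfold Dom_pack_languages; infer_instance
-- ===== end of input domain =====

-- B replaces A's filter/set/sort/length pipeline with two membership tests and a branch (simpler decomposition, same cost).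

-- ===== PORT A =====
def pack_languages (selected : List String) : String :=
  let s := selected.filter (fun x => x == "English" || x == "Spanish")
  let s := PySem.List.sorted (PySem.Set.ofList s) (fun z => if z == "English" then (0 : Int) else 1) false
  if s.length = 2 then "English,Spanish"
  else if s.length = 1 then s[0]!
  else "Spanish"

-- ===== PORT B =====
def pack_languages_alt (selected : List String) : String :=
  let en := selected.contains "English"
  let es := selected.contains "Spanish"
  if en && es then "English,Spanish"
  else if en then "English"
  else "Spanish"

-- ===== PRECONDITION & SPEC =====
def Spec_pack_languages (selected : List String) (out : String) : Prop := out = pack_languages_alt selected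
instance (selected : List String) (out : String) : Decidable (Spec_pack_languages selected out) := by unfold Spec_pack_languages; infer_instance

-- ===== CLAIM (what is proved, stated in full; the proofs are below) =====
def Claim_equal_pack_languages : Prop := ∀ (selected : List String), Dom_pack_languages selected → Spec_pack_languages selected (pack_languages selected)

-- ===== LEMMAS AND PROOFS =====

-- A nodup list over the two languages has one of five shapes.
lemma two_value_cases (l : List String) (hn : l.Nodup)
    (h : ∀ x ∈ l, x = "English" ∨ x = "Spanish") :
    l = [] ∨ l = ["English"] ∨ l = ["Spanish"] ∨
    l = ["English", "Spanish"] ∨ l = ["Spanish", "English"] := by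
  match l, hn, h with
  | [], _, _ => exact Or.inl rfl
  | [a], _, h =>
    rcases h a (by simp) with ha | ha <;> subst ha <;> simp
  | [a, b], hn, h =>
    rcases h a (by simp) with ha | ha <;> rcases h b (by simp) with hb | hb <;>
      subst ha <;> subst hb <;> simp_all
  | a :: b :: c :: t, hn, h =>
    exfalso
    rcases h a (by simp) with ha | ha <;> rcases h b (by simp) with hb | hb <;>
      rcases h c (by simp) with hc | hc <;> subst ha <;> subst hb <;> subst hc <;>
      simp_all

lemma pack_eq (selected : List String) :
    pack_languages selected = pack_languages_alt selected := by
  have hEN : ("English" ∈ selected.filter (fun x => x == "English" || x == "Spanish")) ↔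
      "English" ∈ selected := by simp
  have hES : ("Spanish" ∈ selected.filter (fun x => x == "English" || x == "Spanish")) ↔
      "Spanish" ∈ selected := by simp
  set f := selected.filter (fun x => x == "English" || x == "Spanish") with hf
  have hset := PySem.Set.nodup_ofList (xs := f)
  have hmem : ∀ x, x ∈ PySem.Set.ofList f ↔ x ∈ f := fun x => PySem.Set.mem_ofList f x
  have hsub : ∀ x ∈ PySem.Set.ofList f, x = "English" ∨ x = "Spanish" := by
    intro x hx
    have := (hmem x).mp hx
    rw [hf] at this
    have := List.of_mem_filter this
    simpa using this
  set o := PySem.Set.ofList f with ho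
  rcases two_value_cases o hset (fun x hx => hsub x hx) with h5 | h5 | h5 | h5 | h5 <;>
    rw [pack_languages, pack_languages_alt] <;> simp only [← hf, ← ho, h5]
  · have e1 : ¬ ("English" ∈ selected) := by
      rw [← hEN, ← hmem]; rw [h5]; simp
    have e2 : ¬ ("Spanish" ∈ selected) := by
      rw [← hES, ← hmem]; rw [h5]; simp
    simp [PySem.List.sorted, e1, e2]
  · have e1 : ("English" ∈ selected) := by
      rw [← hEN, ← hmem]; rw [h5]; simp
    have e2 : ¬ ("Spanish" ∈ selected) := by
      rw [← hES, ← hmem]; rw [h5]; simp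
    simp [PySem.List.sorted, PySem.List.insertBy, e1, e2]
  · have e1 : ¬ ("English" ∈ selected) := by
      rw [← hEN, ← hmem]; rw [h5]; simp
    have e2 : ("Spanish" ∈ selected) := by
      rw [← hES, ← hmem]; rw [h5]; simp
    simp [PySem.List.sorted, PySem.List.insertBy, e1, e2]
  · have e1 : ("English" ∈ selected) := by
      rw [← hEN, ← hmem]; rw [h5]; simp
    have e2 : ("Spanish" ∈ selected) := by
      rw [← hES, ← hmem]; rw [h5]; simp
    simp [e1, e2]
  · have e1 : ("English" ∈ selected) := by
      rw [← hEN, ← hmem]; rw [h5]; simp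
    have e2 : ("Spanish" ∈ selected) := by
      rw [← hES, ← hmem]; rw [h5]; simp
    simp [e1, e2]

-- ===== VERDICT (by name: the statement is the Claim_ definition above) =====
theorem pack_languages_spec : Claim_equal_pack_languages := by
  intro selected _
  exact pack_eq selected
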